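-- pv_equiv track=rewrite | github.com/IvanRenison/ProgrammingProblems | 2022-2023 ICPC Brazil Subregional Programming Contest/.F_failures/F'.py | solve
-- ===== SOURCE A (Python) =====
-- from typing import List, Tuple
--
-- def solve(words: List[str]) -> Tuple[str, int]:
--     N: int = len(words)
--
--     indexes: List[int] = [word.find('*') for word in words]
--     candidates: List[str] = [
--         words[i][:indexes[i]] + c + words[i][indexes[i]+1:] for i in range(N) for c in "abcdefghijklmnopqrstuvwxyz"]
--
--     # Count compatibilities
--     compatibilities: List[int] = [0] * len(candidates)
--     for i, candidate in enumerate(candidates):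
--         for j in range(N):
--             if candidate[:indexes[j]] == words[j][:indexes[j]] and candidate[indexes[j]+1:] == words[j][indexes[j]+1:]:
--                 compatibilities[i] += 1
--
--     max_compatibilities: int = max(compatibilities)
--     max_compatibilities_candidates: List[str] = [
--         candidates[i] for i in range(len(candidates)) if compatibilities[i] == max_compatibilities]
--
--     max_compatibilities_candidates.sort()
--     return max_compatibilities_candidates[0], max_compatibilities
-- ===== SOURCE B (Python) =====
-- from typing import List, Tuple
--
-- def solve(words: List[str]) -> Tuple[str, int]:
--     # Bucket-count each word's pattern (star position, prefix, suffix) once,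
--     # so a candidate's compatibility is a sum of O(#distinct star positions) lookups.
--     patterns = {}
--     for w in words:
--         k = w.find('*')
--         key = (k, w[:k], w[k+1:])
--         patterns[key] = patterns.get(key, 0) + 1
--     positions = list(dict.fromkeys(w.find('*') for w in words))
--
--     def compat(cand: str) -> int:
--         return sum(patterns.get((p, cand[:p], cand[p+1:]), 0) for p in positions)
--
--     neg_count, best = min(
--         (-compat(w[:w.find('*')] + c + w[w.find('*')+1:]),
--          w[:w.find('*')] + c + w[w.find('*')+1:])
--         for w in words for c in "abcdefghijklmnopqrstuvwxyz")
--     return best, -neg_count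
-- ===== Notes on version B (the rewrite author's own statement) =====
-- stated objective: faster
-- what changed: Instead of testing each of the 26N candidates against all N words (A's nested scan), B counts each word's (star position, prefix, suffix) pattern once in a dictionary and scores a candidate by one lookup per distinct star position, picking the winner with a single lexicographic min instead of max+filter+sort.
import Mathlib
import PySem

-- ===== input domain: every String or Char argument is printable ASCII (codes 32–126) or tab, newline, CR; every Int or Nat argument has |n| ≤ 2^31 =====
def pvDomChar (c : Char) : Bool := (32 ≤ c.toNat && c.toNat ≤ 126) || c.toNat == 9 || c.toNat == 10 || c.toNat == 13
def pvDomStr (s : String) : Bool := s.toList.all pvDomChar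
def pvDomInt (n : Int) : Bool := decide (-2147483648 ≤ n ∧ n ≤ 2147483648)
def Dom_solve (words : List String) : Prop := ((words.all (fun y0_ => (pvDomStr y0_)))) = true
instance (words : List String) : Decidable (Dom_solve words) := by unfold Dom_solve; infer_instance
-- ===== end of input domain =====

-- B replaces A's candidate×words quadratic scan by one pattern-count dictionary plus
-- per-candidate lookups over the distinct star positions, and a one-pass lexicographic min.

-- ===== PORT A =====
-- literal transliteration of A (string contents handled on the List Char side, as PySem prescribes)
def solve (words : List String) : String × Int :=
  let N : Int := PySem.List.len words
  let indexes : List Int := words.map (fun w => PySem.Str.find w "*")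
  let candidates : List String :=
    (PySem.List.pyRange 0 N 1).flatMap (fun i =>
      "abcdefghijklmnopqrstuvwxyz".toList.map (fun c =>
        let w := (PySem.List.pyGetD words i "").toList
        let k := PySem.List.pyGetD indexes i 0
        String.ofList (PySem.Chars.slice w none (some k) ++ [c] ++
          PySem.Chars.slice w (some (k + 1)) none)))
  let compatibilities : List Int :=
    (PySem.List.enumerate candidates).foldl (fun comps p =>
      (PySem.List.pyRange 0 N 1).foldl (fun comps j =>
        let w := (PySem.List.pyGetD words j "").toList
        let k := PySem.List.pyGetD indexes j 0
        if PySem.Chars.slice p.2.toList none (some k) == PySem.Chars.slice w none (some k) &&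
           PySem.Chars.slice p.2.toList (some (k + 1)) none == PySem.Chars.slice w (some (k + 1)) none
        then PySem.List.pySetD comps p.1 (PySem.List.pyGetD comps p.1 0 + 1)
        else comps) comps)
      (PySem.List.pyRepeat [(0 : Int)] (PySem.List.len candidates))
  match PySem.List.max? compatibilities (fun x => x) with
  | none => ("", 0)  -- Python: max([]) raises ValueError; excluded by Pre_solve
  | some m =>
    let mcands : List String :=
      ((PySem.List.pyRange 0 (PySem.List.len candidates) 1).filter
        (fun i => PySem.List.pyGetD compatibilities i 0 == m)).map
        (fun i => PySem.List.pyGetD candidates i "")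
    let sortedc := PySem.List.sorted mcands (fun x => x) false
    (PySem.List.pyGetD sortedc 0 "", m)

-- ===== PORT B =====
-- literal transliteration of Source B
def solve_alt (words : List String) : String × Int :=
  let patterns : PySem.Dict (Int × List Char × List Char) Int :=
    words.foldl (fun d w =>
      let k := PySem.Str.find w "*"
      let key := (k, PySem.Chars.slice w.toList none (some k),
                     PySem.Chars.slice w.toList (some (k + 1)) none)
      d.insert key (d.getD key 0 + 1)) PySem.Dict.empty
  let positions : List Int := PySem.List.dedup (words.map (fun w => PySem.Str.find w "*"))
  let compat : String → Int := fun cand =>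
    positions.foldl (fun acc p =>
      acc + patterns.getD (p, PySem.Chars.slice cand.toList none (some p),
                              PySem.Chars.slice cand.toList (some (p + 1)) none) 0) 0
  match PySem.List.min2?
      (words.flatMap (fun w =>
        let k := PySem.Str.find w "*"
        "abcdefghijklmnopqrstuvwxyz".toList.map (fun c =>
          let cand := String.ofList (PySem.Chars.slice w.toList none (some k) ++ [c] ++
                      PySem.Chars.slice w.toList (some (k + 1)) none)
          (-(compat cand), cand))))
      (fun p => p.1) (fun p => p.2) with
  | some p => (p.2, -p.1)
  | none => ("", 0)  -- Python: min of an empty generator raises ValueError; excluded by Pre_solve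

-- ===== PRECONDITION & SPEC =====
-- Pre_ excludes only the empty list, on which both Pythons raise ValueError (max/min of an empty sequence).
def Pre_solve (words : List String) : Prop := words ≠ []
instance (words : List String) : Decidable (Pre_solve words) := by unfold Pre_solve; infer_instance
def pvWitness_solve : List String := ["a*c", "*bc"]

def Spec_solve (words : List String) (out : String × Int) : Prop := out = solve_alt words
instance (words : List String) (out : String × Int) : Decidable (Spec_solve words out) := by
  unfold Spec_solve; infer_instance

-- ===== CLAIM (what is proved, stated in full; the proofs are below) =====
def Claim_equal_solve : Prop :=
  ∀ (words : List String), Dom_solve words → Pre_solve words → Spec_solve words (solve words)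

-- ===== LEMMAS AND PROOFS =====

-- proof-side vocabulary: star index, masked-pattern key of a word, lookup key of a candidate,
-- candidate built from a word and a letter, compatibility count, candidate list
def pvG (w : String) : Int := PySem.Str.find w "*"
def pvK1 (x : List Char) (p : Int) : List Char := PySem.Chars.slice x none (some p)
def pvK2 (x : List Char) (p : Int) : List Char := PySem.Chars.slice x (some (p + 1)) none
def pvKey (w : String) : Int × List Char × List Char :=
  (pvG w, pvK1 w.toList (pvG w), pvK2 w.toList (pvG w))
def pvCKey (cand : List Char) (p : Int) : Int × List Char × List Char :=
  (p, pvK1 cand p, pvK2 cand p)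
def pvMk (w : String) (c : Char) : String :=
  String.ofList (pvK1 w.toList (pvG w) ++ [c] ++ pvK2 w.toList (pvG w))
def pvCnt (words : List String) (cand : List Char) : Int :=
  ((words.countP (fun w => pvKey w == pvCKey cand (pvG w))) : Int)
def pvCands (words : List String) : List String :=
  words.flatMap (fun w => "abcdefghijklmnopqrstuvwxyz".toList.map (pvMk w))

-- canonical (definitionally equal) reshaping of the two ports
def pvCandsA (words : List String) : List String :=
  (PySem.List.pyRange 0 (PySem.List.len words) 1).flatMap (fun i =>
    "abcdefghijklmnopqrstuvwxyz".toList.map (fun c =>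
      String.ofList (PySem.Chars.slice (PySem.List.pyGetD words i "").toList none
          (some (PySem.List.pyGetD (words.map (fun w => PySem.Str.find w "*")) i 0)) ++ [c] ++
        PySem.Chars.slice (PySem.List.pyGetD words i "").toList
          (some (PySem.List.pyGetD (words.map (fun w => PySem.Str.find w "*")) i 0 + 1)) none)))

def pvCompsA (words : List String) : List Int :=
  (PySem.List.enumerate (pvCandsA words)).foldl (fun comps p =>
    (PySem.List.pyRange 0 (PySem.List.len words) 1).foldl (fun comps j =>
      if PySem.Chars.slice p.2.toList none (some (PySem.List.pyGetD (words.map (fun w => PySem.Str.find w "*")) j 0)) ==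
           PySem.Chars.slice (PySem.List.pyGetD words j "").toList none (some (PySem.List.pyGetD (words.map (fun w => PySem.Str.find w "*")) j 0)) &&
         PySem.Chars.slice p.2.toList (some (PySem.List.pyGetD (words.map (fun w => PySem.Str.find w "*")) j 0 + 1)) none ==
           PySem.Chars.slice (PySem.List.pyGetD words j "").toList (some (PySem.List.pyGetD (words.map (fun w => PySem.Str.find w "*")) j 0 + 1)) none
      then PySem.List.pySetD comps p.1 (PySem.List.pyGetD comps p.1 0 + 1)
      else comps) comps)
    (PySem.List.pyRepeat [(0 : Int)] (PySem.List.len (pvCandsA words)))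

def pvMcandsA (words : List String) (m : Int) : List String :=
  ((PySem.List.pyRange 0 (PySem.List.len (pvCandsA words)) 1).filter
    (fun i => PySem.List.pyGetD (pvCompsA words) i 0 == m)).map
    (fun i => PySem.List.pyGetD (pvCandsA words) i "")

theorem pv_solveA : ∀ words, solve words =
    match PySem.List.max? (pvCompsA words) (fun x => x) with
    | none => ("", 0)
    | some m =>
      (PySem.List.pyGetD (PySem.List.sorted (pvMcandsA words m) (fun x => x) false) 0 "", m) := by
  intro words
  rfl

def pvPatterns (words : List String) : PySem.Dict (Int × List Char × List Char) Int :=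
  words.foldl (fun d w => d.insert (pvKey w) (d.getD (pvKey w) 0 + 1)) PySem.Dict.empty

def pvCompatB (words : List String) (cand : String) : Int :=
  (PySem.List.dedup (words.map (fun w => PySem.Str.find w "*"))).foldl (fun acc p =>
    acc + (pvPatterns words).getD (pvCKey cand.toList p) 0) 0

theorem pv_solveB : ∀ words, solve_alt words =
    match PySem.List.min2?
        (words.flatMap (fun w =>
          "abcdefghijklmnopqrstuvwxyz".toList.map (fun c =>
            (-(pvCompatB words (pvMk w c)), pvMk w c))))
        (fun p => p.1) (fun p => p.2) with
    | some p => (p.2, -p.1)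
    | none => ("", 0) := by
  intro words
  rfl

theorem pv_range_flatMap {α β : Type} (G : α → List β) (d : α) :
    ∀ (l : List α), (List.range l.length).flatMap (fun i => G (l.getD i d)) = l.flatMap G := by
  intro l
  induction l with
  | nil => simp
  | cons x t ih =>
    rw [List.length_cons, List.range_succ_eq_map, List.flatMap_cons, List.flatMap_map]
    simp only [List.getD_cons_zero, List.getD_cons_succ]
    rw [List.flatMap_cons]
    exact congrArg _ ih

theorem pv_incr_loop {α : Type} (Q : α → Bool) :
    ∀ (l : List α) (comps : List Int) (i : Nat), i < comps.length →
    l.foldl (fun cs x => if Q x then cs.set i (cs.getD i 0 + 1) else cs) comps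
      = comps.set i (comps.getD i 0 + l.countP Q) := by
  intro l
  induction l with
  | nil =>
    intro comps i h
    rw [List.countP_nil, List.foldl_nil]
    rw [List.getD_eq_getElem _ _ h]
    norm_num [List.set_getElem_self h]
  | cons x t ih =>
    intro comps i h
    simp only [List.foldl_cons, List.countP_cons]
    by_cases hq : Q x
    · rw [if_pos hq, ih _ i (by simpa using h)]
      rw [List.set_set]
      rw [List.getD_eq_getElem _ _ (by simpa using h : i < (comps.set i (comps.getD i 0 + 1)).length)]
      rw [List.getElem_set_self (by simpa using h)]
      simp only [hq, if_true]
      rw [List.getD_eq_getElem _ _ h]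
      congr 1
      push_cast
      ring
    · rw [if_neg hq, ih _ i h]
      simp [hq]

theorem pv_mcands (f : String → Int) (m : Int) :
    ∀ (l : List String),
    ((List.range l.length).filter (fun i => (l.map f).getD i 0 == m)).map (fun i => l.getD i "") =
      l.filter (fun c => f c == m) := by
  intro l
  induction l with
  | nil => simp
  | cons x t ih =>
    rw [List.length_cons, List.range_succ_eq_map, List.filter_cons, List.filter_map]
    simp only [List.map_cons, List.getD_cons_zero, List.getD_cons_succ, Function.comp_def]
    rw [List.filter_cons]
    by_cases hx : (f x == m) = true
    · simp only [hx, if_true, List.map_cons, List.getD_cons_zero, List.map_map, Function.comp_def,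
        List.getD_cons_succ]
      rw [ih]
    · simp only [hx, Bool.false_eq_true, if_false, List.map_map, Function.comp_def,
        List.getD_cons_succ]
      rw [ih]

def pvLexLe (a b : Int × String) : Prop := a.1 < b.1 ∨ (a.1 = b.1 ∧ a.2 ≤ b.2)

theorem pvLexLe_trans {a b c : Int × String} (h1 : pvLexLe a b) (h2 : pvLexLe b c) : pvLexLe a c := by
  rcases h1 with h1 | ⟨e1, l1⟩ <;> rcases h2 with h2 | ⟨e2, l2⟩
  · exact Or.inl (lt_trans h1 h2)
  · exact Or.inl (e2 ▸ h1)
  · exact Or.inl (e1 ▸ h2)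
  · exact Or.inr ⟨e1.trans e2, le_trans l1 l2⟩

theorem pvLexLe_refl (a : Int × String) : pvLexLe a a := Or.inr ⟨rfl, le_refl _⟩

theorem pv_min2_char :
    ∀ (xs : List (Int × String)) (x m : Int × String),
    PySem.List.min2? (x :: xs) (fun p => p.1) (fun p => p.2) = some m →
    (m = x ∨ m ∈ xs) ∧ pvLexLe m x ∧ ∀ u ∈ xs, pvLexLe m u := by
  intro xs
  induction xs with
  | nil =>
    intro x m h
    unfold PySem.List.min2? at h
    simp at h
    exact ⟨Or.inl h.symm, h ▸ pvLexLe_refl x, by simp⟩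
  | cons y t ih =>
    intro x m h
    by_cases hc : (decide (y.1 < x.1) || !decide (x.1 < y.1) && decide (y.2 < x.2)) = true
    · have hstep : PySem.List.min2? (x :: y :: t) (fun p => p.1) (fun p => p.2) =
          PySem.List.min2? (y :: t) (fun p => p.1) (fun p => p.2) := by
        simp only [PySem.List.min2?, List.foldl_cons]
        congr 1
        show (if (decide (y.1 < x.1) || !decide (x.1 < y.1) && decide (y.2 < x.2)) = true
          then some y else some x) = some y
        rw [if_pos hc]
      rw [hstep] at h
      have hyx : pvLexLe y x := by
        simp only [Bool.or_eq_true, Bool.and_eq_true, Bool.not_eq_true', decide_eq_true_eq,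
          decide_eq_false_iff_not] at hc
        rcases hc with hc | ⟨hc1, hc2⟩
        · exact Or.inl hc
        · rcases lt_or_eq_of_le (not_lt.mp hc1) with hlt | heq
          · exact Or.inl hlt
          · exact Or.inr ⟨heq, le_of_lt hc2⟩
      obtain ⟨hm, hle, hall⟩ := ih y m h
      refine ⟨Or.inr ?_, pvLexLe_trans hle hyx, ?_⟩
      · rcases hm with rfl | hm
        · exact List.mem_cons_self
        · exact List.mem_cons_of_mem _ hm
      · intro u hu
        rcases List.mem_cons.mp hu with rfl | hu
        · exact hle
        · exact hall u hu
    · have hstep : PySem.List.min2? (x :: y :: t) (fun p => p.1) (fun p => p.2) =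
          PySem.List.min2? (x :: t) (fun p => p.1) (fun p => p.2) := by
        simp only [PySem.List.min2?, List.foldl_cons]
        congr 1
        show (if (decide (y.1 < x.1) || !decide (x.1 < y.1) && decide (y.2 < x.2)) = true
          then some y else some x) = some x
        rw [if_neg hc]
      rw [hstep] at h
      have hxy : pvLexLe x y := by
        simp only [Bool.or_eq_true, Bool.and_eq_true, Bool.not_eq_true', decide_eq_true_eq,
          decide_eq_false_iff_not, not_or, not_and] at hc
        obtain ⟨h1, h2⟩ := hc
        rcases lt_or_eq_of_le (not_lt.mp h1) with hlt | heq
        · exact Or.inl hlt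
        · exact Or.inr ⟨heq, not_lt.mp (h2 (by omega))⟩
      obtain ⟨hm, hle, hall⟩ := ih x m h
      refine ⟨?_, hle, ?_⟩
      · rcases hm with rfl | hm
        · exact Or.inl rfl
        · exact Or.inr (List.mem_cons_of_mem _ hm)
      · intro u hu
        rcases List.mem_cons.mp hu with rfl | hu
        · exact pvLexLe_trans hle hxy
        · exact hall u hu

theorem pv_min2_ne_none :
    ∀ (xs : List (Int × String)) (x : Int × String),
    PySem.List.min2? (x :: xs) (fun p => p.1) (fun p => p.2) ≠ none := by
  intro xs
  induction xs with
  | nil =>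
    intro x
    unfold PySem.List.min2?
    simp
  | cons y t ih =>
    intro x
    by_cases hc : (decide (y.1 < x.1) || !decide (x.1 < y.1) && decide (y.2 < x.2)) = true
    · have hstep : PySem.List.min2? (x :: y :: t) (fun p => p.1) (fun p => p.2) =
          PySem.List.min2? (y :: t) (fun p => p.1) (fun p => p.2) := by
        simp only [PySem.List.min2?, List.foldl_cons]
        congr 1
        show (if (decide (y.1 < x.1) || !decide (x.1 < y.1) && decide (y.2 < x.2)) = true
          then some y else some x) = some y
        rw [if_pos hc]
      rw [hstep]; exact ih y
    · have hstep : PySem.List.min2? (x :: y :: t) (fun p => p.1) (fun p => p.2) =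
          PySem.List.min2? (x :: t) (fun p => p.1) (fun p => p.2) := by
        simp only [PySem.List.min2?, List.foldl_cons]
        congr 1
        show (if (decide (y.1 < x.1) || !decide (x.1 < y.1) && decide (y.2 < x.2)) = true
          then some y else some x) = some x
        rw [if_neg hc]
      rw [hstep]; exact ih x

-- a word matches a candidate's lookup key only at its own star position
theorem pv_key_fst (w : String) (cand : List Char) (p : Int) :
    (pvKey w == pvCKey cand p) = true → pvG w = p := by
  intro h
  have := beq_iff_eq.mp h
  simpa [pvKey, pvCKey] using congrArg Prod.fst this

theorem pv_indicator (cand : List Char) (w : String) :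
    ∀ (ps : List Int), ps.Nodup → pvG w ∈ ps →
    (ps.map (fun p => (if pvKey w == pvCKey cand p then (1 : Int) else 0))).sum =
      (if pvKey w == pvCKey cand (pvG w) then (1 : Int) else 0) := by
  intro ps
  induction ps with
  | nil => simp
  | cons q qs ih =>
    intro hnd hmem
    rw [List.map_cons, List.sum_cons]
    rcases List.mem_cons.mp hmem with rfl | hmem
    · have hzero : (qs.map (fun p => (if pvKey w == pvCKey cand p then (1 : Int) else 0))).sum = 0 := by
        apply List.sum_eq_zero
        intro x hx
        obtain ⟨p, hp, rfl⟩ := List.mem_map.mp hx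
        have hne : pvG w ≠ p := fun he => (List.nodup_cons.mp hnd).1 (he ▸ hp)
        have : (pvKey w == pvCKey cand p) = false := by
          by_contra hcontra
          exact hne (pv_key_fst w cand p (by simpa using hcontra))
        simp [this]
      rw [hzero]
      ring
    · have hne : pvG w ≠ q := by
        intro he
        exact (List.nodup_cons.mp hnd).1 (he ▸ hmem)
      have hq : (pvKey w == pvCKey cand q) = false := by
        by_contra hcontra
        exact hne (pv_key_fst w cand q (by simpa using hcontra))
      rw [hq]
      simp only [Bool.false_eq_true, if_false, zero_add]
      exact ih (List.nodup_cons.mp hnd).2 hmem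

theorem pv_partition (cand : List Char) :
    ∀ (words : List String) (ps : List Int), ps.Nodup → (∀ w ∈ words, pvG w ∈ ps) →
    (ps.map (fun p => ((words.countP (fun w => pvKey w == pvCKey cand p)) : Int))).sum =
      pvCnt words cand := by
  intro words
  induction words with
  | nil => intro ps _ _; simp [pvCnt]
  | cons w ws ih =>
    intro ps hnd hmem
    have hsplit : ∀ p : Int,
        (((w :: ws).countP (fun w => pvKey w == pvCKey cand p)) : Int) =
          ((ws.countP (fun w => pvKey w == pvCKey cand p)) : Int) +
            (if pvKey w == pvCKey cand p then (1 : Int) else 0) := by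
      intro p
      rw [List.countP_cons]
      split_ifs with h <;> simp
    simp only [hsplit]
    rw [PySem.List.sum_map_add_int]
    rw [ih ps hnd (fun w hw => hmem w (List.mem_cons_of_mem _ hw))]
    rw [pv_indicator cand w ps hnd (hmem w List.mem_cons_self)]
    unfold pvCnt
    rw [List.countP_cons]
    split_ifs with h <;> simp

theorem pv_match_eq (cand : List Char) (w : String) :
    (PySem.Chars.slice cand none (some (PySem.Str.find w "*")) ==
        PySem.Chars.slice w.toList none (some (PySem.Str.find w "*")) &&
      PySem.Chars.slice cand (some (PySem.Str.find w "*" + 1)) none ==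
        PySem.Chars.slice w.toList (some (PySem.Str.find w "*" + 1)) none)
    = (pvKey w == pvCKey cand (pvG w)) := by
  simp only [pvKey, pvCKey, pvK1, pvK2, pvG]
  rw [Bool.eq_iff_iff]
  simp only [Bool.and_eq_true, beq_iff_eq, Prod.mk.injEq, true_and]
  constructor
  · rintro ⟨h1, h2⟩; exact ⟨h1.symm, h2.symm⟩
  · rintro ⟨h1, h2⟩; exact ⟨h1.symm, h2.symm⟩

theorem pv_getD_map_int {α β : Type} (f : α → β) (l : List α) (j : Int)
    (h0 : 0 ≤ j) (h1 : j < (l.length : Int)) (d : α) (d' : β) :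
    PySem.List.pyGetD (l.map f) j d' = f (PySem.List.pyGetD l j d) := by
  rw [PySem.List.pyGetD_eq_getElem _ d' h0 (by simpa using h1),
    PySem.List.pyGetD_eq_getElem _ d h0 h1, List.getElem_map]

theorem pv_inner (words : List String) (cand : List Char) :
    ∀ (comps : List Int) (k : Nat), k < comps.length →
    (PySem.List.pyRange 0 (PySem.List.len words) 1).foldl (fun comps j =>
      if PySem.Chars.slice cand none (some (PySem.List.pyGetD (words.map (fun w => PySem.Str.find w "*")) j 0)) ==
           PySem.Chars.slice (PySem.List.pyGetD words j "").toList none (some (PySem.List.pyGetD (words.map (fun w => PySem.Str.find w "*")) j 0)) &&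
         PySem.Chars.slice cand (some (PySem.List.pyGetD (words.map (fun w => PySem.Str.find w "*")) j 0 + 1)) none ==
           PySem.Chars.slice (PySem.List.pyGetD words j "").toList (some (PySem.List.pyGetD (words.map (fun w => PySem.Str.find w "*")) j 0 + 1)) none
      then PySem.List.pySetD comps ((k : Nat) : Int) (PySem.List.pyGetD comps ((k : Nat) : Int) 0 + 1)
      else comps) comps
    = comps.set k (comps.getD k 0 + pvCnt words cand) := by
  intro comps k hk
  rw [PySem.List.len_eq]
  rw [PySem.List.foldl_congr_mem _ _
    (fun comps j =>
      if PySem.Chars.slice cand none (some (PySem.Str.find (PySem.List.pyGetD words j "") "*")) ==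
           PySem.Chars.slice (PySem.List.pyGetD words j "").toList none (some (PySem.Str.find (PySem.List.pyGetD words j "") "*")) &&
         PySem.Chars.slice cand (some (PySem.Str.find (PySem.List.pyGetD words j "") "*" + 1)) none ==
           PySem.Chars.slice (PySem.List.pyGetD words j "").toList (some (PySem.Str.find (PySem.List.pyGetD words j "") "*" + 1)) none
      then PySem.List.pySetD comps ((k : Nat) : Int) (PySem.List.pyGetD comps ((k : Nat) : Int) 0 + 1)
      else comps) _ ?_]
  · rw [PySem.List.foldl_pyRange_zero_pyGetD' words ""
      (fun comps w =>
        if PySem.Chars.slice cand none (some (PySem.Str.find w "*")) ==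
             PySem.Chars.slice w.toList none (some (PySem.Str.find w "*")) &&
           PySem.Chars.slice cand (some (PySem.Str.find w "*" + 1)) none ==
             PySem.Chars.slice w.toList (some (PySem.Str.find w "*" + 1)) none
        then PySem.List.pySetD comps ((k : Nat) : Int) (PySem.List.pyGetD comps ((k : Nat) : Int) 0 + 1)
        else comps) comps]
    simp only [pv_match_eq, PySem.List.pySetD_natCast, PySem.List.pyGetD_natCast]
    exact pv_incr_loop _ words comps k hk
  · intro acc j hj
    obtain ⟨hj0, hj1⟩ := PySem.List.mem_pyRange_one.mp hj
    rw [pv_getD_map_int (fun w => PySem.Str.find w "*") words j hj0 hj1 ""]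

theorem pv_outer (words : List String) :
    ∀ (cs : List String) (pre : List Int),
    (PySem.List.enumerate cs ((pre.length : Nat) : Int)).foldl
      (fun comps p =>
        (PySem.List.pyRange 0 (PySem.List.len words) 1).foldl (fun comps j =>
          if PySem.Chars.slice p.2.toList none (some (PySem.List.pyGetD (words.map (fun w => PySem.Str.find w "*")) j 0)) ==
               PySem.Chars.slice (PySem.List.pyGetD words j "").toList none (some (PySem.List.pyGetD (words.map (fun w => PySem.Str.find w "*")) j 0)) &&
             PySem.Chars.slice p.2.toList (some (PySem.List.pyGetD (words.map (fun w => PySem.Str.find w "*")) j 0 + 1)) none ==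
               PySem.Chars.slice (PySem.List.pyGetD words j "").toList (some (PySem.List.pyGetD (words.map (fun w => PySem.Str.find w "*")) j 0 + 1)) none
          then PySem.List.pySetD comps p.1 (PySem.List.pyGetD comps p.1 0 + 1)
          else comps) comps)
      (pre ++ List.replicate cs.length 0)
      = pre ++ cs.map (fun s => pvCnt words s.toList) := by
  intro cs
  induction cs with
  | nil => intro pre; simp [PySem.List.enumerate_nil]
  | cons cand cs ih =>
    intro pre
    rw [PySem.List.enumerate_cons, List.foldl_cons]
    have hstep := pv_inner words cand.toList (pre ++ 0 :: List.replicate cs.length 0) pre.length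
      (by simp)
    simp only [List.length_cons] at hstep ⊢
    rw [List.replicate_succ, hstep]
    rw [List.getD_append_right pre _ _ _ (le_refl pre.length)]
    simp only [Nat.sub_self, List.getD_cons_zero, zero_add]
    rw [List.set_append_right _ _ (le_refl pre.length)]
    simp only [Nat.sub_self, List.set_cons_zero]
    have := ih (pre ++ [pvCnt words cand.toList])
    simp only [List.length_append, List.length_cons, List.length_nil, Nat.cast_add,
      Nat.cast_one, zero_add, List.append_assoc, List.singleton_append,
      List.map_cons] at this ⊢
    exact this

theorem pv_candsA_eq (words : List String) : pvCandsA words = pvCands words := by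
  unfold pvCandsA pvCands
  rw [PySem.List.len_eq, PySem.List.pyRange_zero_natCast, List.flatMap_map]
  rw [← pv_range_flatMap (fun w => "abcdefghijklmnopqrstuvwxyz".toList.map (pvMk w)) "" words]
  rw [List.flatMap_def, List.flatMap_def]
  apply congrArg List.flatten
  apply List.map_congr_left
  intro i hi
  have hlt : i < words.length := List.mem_range.mp hi
  rw [pv_getD_map_int (fun w => PySem.Str.find w "*") words (i : Int) (by omega)
    (by exact_mod_cast hlt) ""]
  rw [PySem.List.pyGetD_natCast]
  rfl

theorem pv_compsA_eq (words : List String) :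
    pvCompsA words = (pvCandsA words).map (fun s => pvCnt words s.toList) := by
  unfold pvCompsA
  simp only [PySem.List.len_eq, PySem.List.pyRepeat_singleton, Int.toNat_natCast]
  have := pv_outer words (pvCandsA words) []
  simp only [PySem.List.len_eq] at this
  simpa using this

theorem pv_mcandsA_eq (words : List String) (m : Int) :
    pvMcandsA words m = (pvCands words).filter (fun c => pvCnt words c.toList == m) := by
  unfold pvMcandsA
  rw [pv_compsA_eq]
  rw [pv_candsA_eq, PySem.List.len_eq, PySem.List.pyRange_zero_natCast,
    List.filter_map, List.map_map]
  simp only [Function.comp_def, PySem.List.pyGetD_natCast]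
  exact pv_mcands (fun s => pvCnt words s.toList) m (pvCands words)

theorem pv_compatB_eq (words : List String) (cand : String) :
    pvCompatB words cand = pvCnt words cand.toList := by
  unfold pvCompatB pvPatterns
  have hfold : List.foldl (fun d w => d.insert (pvKey w) (d.getD (pvKey w) 0 + 1))
      PySem.Dict.empty words = PySem.Dict.counter (words.map pvKey) := by
    rw [← PySem.Dict.foldl_insert_getD_add_one_eq_counter, List.foldl_map]
  simp only [hfold]
  rw [PySem.List.foldl_add]
  simp only [PySem.Dict.getD_counter, List.count_eq_countP, List.countP_map, Function.comp_def]
  rw [zero_add]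
  apply pv_partition cand.toList words
  · exact PySem.List.nodup_dedup _
  · intro w hw
    rw [PySem.List.mem_dedup]
    exact List.mem_map.mpr ⟨w, hw, rfl⟩

theorem pv_pairs (words : List String) :
    (pvCands words).map (fun c => (-(pvCnt words c.toList), c)) =
      words.flatMap (fun w => "abcdefghijklmnopqrstuvwxyz".toList.map (fun c =>
        (-(pvCnt words (pvMk w c).toList), pvMk w c))) := by
  unfold pvCands
  rw [List.map_flatMap]
  simp only [List.map_map, Function.comp_def]

theorem pv_final (cs : List String) (f : String → Int) (hne : cs ≠ []) :
    ∃ (m : Int) (p : Int × String),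
      PySem.List.max? (cs.map f) (fun x => x) = some m ∧
      PySem.List.min2? (cs.map (fun c => (-(f c), c))) (fun p => p.1) (fun p => p.2) = some p ∧
      (PySem.List.pyGetD
        (PySem.List.sorted (cs.filter (fun c => f c == m)) (fun x => x) false) 0 "", m)
        = (p.2, -p.1) := by
  rcases cs with _ | ⟨c1, cs'⟩
  · exact absurd rfl hne
  rcases hmax : PySem.List.max? ((c1 :: cs').map f) (fun x => x) with _ | m
  · rw [PySem.List.max?_eq_none_iff] at hmax
    simp at hmax
  obtain ⟨cstar, hcstar, hfcstar⟩ := List.mem_map.mp (PySem.List.max?_mem hmax)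
  have hfilt : cstar ∈ (c1 :: cs').filter (fun c => f c == m) :=
    List.mem_filter.mpr ⟨hcstar, by simp [hfcstar]⟩
  rcases hsort : PySem.List.sorted ((c1 :: cs').filter (fun c => f c == m)) (fun x => x) false
    with _ | ⟨h0, tl⟩
  · rw [PySem.List.sorted_eq_nil_iff] at hsort
    rw [hsort] at hfilt
    exact absurd hfilt List.not_mem_nil
  have hh0filt : h0 ∈ (c1 :: cs').filter (fun c => f c == m) := by
    rw [← PySem.List.mem_sorted _ (fun x => x) false, hsort]
    exact List.mem_cons_self
  obtain ⟨hh0mem, hh0beq⟩ := List.mem_filter.mp hh0filt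
  have hh0m : f h0 = m := beq_iff_eq.mp hh0beq
  have hmax_all : ∀ c ∈ c1 :: cs', f c ≤ m := by
    intro c hc
    exact PySem.List.max?_isMax hmax (f c) (List.mem_map_of_mem hc)
  have hh0min : ∀ c ∈ (c1 :: cs').filter (fun c => f c == m), h0 ≤ c := by
    intro c hc
    exact PySem.List.key_head_sorted_le _ (fun x => x) hsort c hc
  rcases hmin : PySem.List.min2? ((c1 :: cs').map (fun c => (-(f c), c)))
      (fun p => p.1) (fun p => p.2) with _ | p
  · rw [List.map_cons] at hmin
    exact absurd hmin (pv_min2_ne_none _ _)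
  have hmin' := hmin
  rw [List.map_cons] at hmin'
  obtain ⟨hpmem, hple1, hpleall⟩ := pv_min2_char _ _ _ hmin'
  have hpmem' : p ∈ (c1 :: cs').map (fun c => (-(f c), c)) := by
    rw [List.map_cons]
    rcases hpmem with rfl | hp
    · exact List.mem_cons_self
    · exact List.mem_cons_of_mem _ hp
  obtain ⟨c0, hc0mem, hpc0⟩ := List.mem_map.mp hpmem'
  subst hpc0
  have hplemap : ∀ c ∈ c1 :: cs', pvLexLe (-(f c0), c0) (-(f c), c) := by
    intro c hc
    rcases List.mem_cons.mp hc with rfl | hc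
    · exact hple1
    · exact hpleall _ (List.mem_map_of_mem hc)
  have hfc0 : f c0 = m := by
    have h1 := hplemap cstar hcstar
    have hle := hmax_all c0 hc0mem
    rcases h1 with h1 | ⟨h1, _⟩
    · simp only [hfcstar] at h1
      omega
    · simp only [hfcstar] at h1
      omega
  have hc0filt : c0 ∈ (c1 :: cs').filter (fun c => f c == m) :=
    List.mem_filter.mpr ⟨hc0mem, by simp [hfc0]⟩
  have hh0lec0 : h0 ≤ c0 := hh0min c0 hc0filt
  have hc0leh0 : c0 ≤ h0 := by
    have h2 := hplemap h0 hh0mem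
    rcases h2 with h2 | ⟨_, h2⟩
    · simp only [hh0m, hfc0] at h2
      omega
    · exact h2
  have hh0c0 : h0 = c0 := le_antisymm hh0lec0 hc0leh0
  refine ⟨m, (-(f c0), c0), rfl, rfl, ?_⟩
  rw [hsort, PySem.List.pyGetD_zero_cons, hh0c0]
  simp [hfc0]

-- ===== VERDICT (by name: the statement is the Claim_ definition above) =====
theorem solve_spec : Claim_equal_solve := by
  intro words _ hpre
  unfold Spec_solve
  have hCS : pvCands words ≠ [] := by
    rcases words with _ | ⟨w, ws⟩
    · exact absurd rfl hpre
    · intro hc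
      have hlen := congrArg List.length hc
      unfold pvCands at hlen
      rw [List.flatMap_cons, List.length_append, List.length_map] at hlen
      have h26 : ("abcdefghijklmnopqrstuvwxyz".toList).length = 26 := rfl
      rw [h26] at hlen
      simp at hlen
  rw [pv_solveA, pv_solveB]
  simp only [pv_compatB_eq]
  rw [← pv_pairs]
  simp only [pv_compsA_eq, pv_candsA_eq, pv_mcandsA_eq]
  obtain ⟨m, p, hmax, hmin, heq⟩ := pv_final (pvCands words) (fun s => pvCnt words s.toList) hCS
  rw [hmax, hmin]
  exact heq
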